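-- pv_equiv track=rewrite | github.com/AquariusGit/AnkiGenerator | src/anki_generator.py | _merge_subtitles
-- ===== SOURCE A (Python) =====
-- def _merge_subtitles(subtitles, max_gap_ms):
--     """合并时间接近的字幕行"""
--     if not subtitles or max_gap_ms <= 0:
--         return subtitles
--
--     merged_subtitles = []
--     current_merge = None
--
--     for sub in subtitles:
--         start, end, text = sub
--         if current_merge is None:
--             current_merge = [start, end, text]
--         else:
--             # 如果当前字幕的开始时间与前一个合并字幕的结束时间之间的间隔小于等于最大间隔
--             if start - current_merge[1] <= max_gap_ms:
--                 current_merge[1] = end  # 更新结束时间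
--                 current_merge[2] += " " + text  # 合并文本
--             else:
--                 merged_subtitles.append(tuple(current_merge))
--                 current_merge = [start, end, text]
--
--     if current_merge is not None:
--         merged_subtitles.append(tuple(current_merge))
--
--     return merged_subtitles
-- ===== SOURCE B (Python) =====
-- def _merge_subtitles(subtitles, max_gap_ms):
--     """合并时间接近的字幕行"""
--     if not subtitles or max_gap_ms <= 0:
--         return subtitles
--
--     # Pass 1: partition into runs of gap-adjacent subtitles.
--     groups = []
--     for sub in subtitles:
--         if groups and sub[0] - groups[-1][-1][1] <= max_gap_ms:
--             groups[-1].append(sub)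
--         else:
--             groups.append([sub])
--
--     # Pass 2: collapse each run into a single subtitle.
--     return [(g[0][0], g[-1][1], " ".join(s[2] for s in g)) for g in groups]
-- ===== Notes on version B (the rewrite author's own statement) =====
-- stated objective: alternative
-- what changed: Replaces A's single stateful loop carrying a mutable current_merge accumulator with a group-then-reduce pipeline: one pass partitions subtitles into gap-adjacent runs, a second pass maps each run to (first start, last end, ' '.join of texts).
import Mathlib
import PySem

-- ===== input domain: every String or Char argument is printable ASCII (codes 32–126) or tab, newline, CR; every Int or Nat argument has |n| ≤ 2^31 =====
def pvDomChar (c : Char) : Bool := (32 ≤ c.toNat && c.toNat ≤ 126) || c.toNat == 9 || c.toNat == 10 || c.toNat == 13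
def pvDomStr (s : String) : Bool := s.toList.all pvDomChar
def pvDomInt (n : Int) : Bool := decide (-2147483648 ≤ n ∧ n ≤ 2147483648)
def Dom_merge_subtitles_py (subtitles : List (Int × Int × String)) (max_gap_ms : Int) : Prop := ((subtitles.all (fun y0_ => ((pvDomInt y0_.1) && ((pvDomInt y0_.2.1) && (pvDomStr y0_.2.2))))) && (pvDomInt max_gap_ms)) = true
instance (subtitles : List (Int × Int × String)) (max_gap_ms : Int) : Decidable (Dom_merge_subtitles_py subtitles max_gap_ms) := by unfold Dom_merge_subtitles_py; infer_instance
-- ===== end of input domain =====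

-- B replaces A's stateful loop (mutable current_merge) by a group-then-reduce pipeline; equal return value, no speed claim.

-- ===== PORT A =====
-- the loop body of A: state = (merged_subtitles, current_merge)
def pvAStep (max_gap_ms : Int)
    (acc : List (Int × Int × String) × Option (Int × Int × String))
    (sub : Int × Int × String) : List (Int × Int × String) × Option (Int × Int × String) :=
  match acc.2 with
  | none => (acc.1, some (sub.1, sub.2.1, sub.2.2))
  | some cm =>
      if sub.1 - cm.2.1 ≤ max_gap_ms then
        (acc.1, some (cm.1, sub.2.1, cm.2.2 ++ " " ++ sub.2.2))
      else
        (acc.1 ++ [cm], some (sub.1, sub.2.1, sub.2.2))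

def merge_subtitles_py (subtitles : List (Int × Int × String)) (max_gap_ms : Int) : List (Int × Int × String) :=
  if subtitles = [] ∨ max_gap_ms ≤ 0 then subtitles
  else
    let st := subtitles.foldl (pvAStep max_gap_ms) ([], none)
    match st.2 with
    | none => st.1
    | some cm => st.1 ++ [cm]

-- ===== PORT B =====
-- pass 1 loop body: append sub to the last group if gap-adjacent, else start a new group
def pvBStep (max_gap_ms : Int) (groups : List (List (Int × Int × String)))
    (sub : Int × Int × String) : List (List (Int × Int × String)) :=
  match groups.getLast? with
  | some g =>
      match g.getLast? with
      | some last =>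
          if sub.1 - last.2.1 ≤ max_gap_ms then groups.dropLast ++ [g ++ [sub]]
          else groups ++ [[sub]]
      | none => groups ++ [[sub]]
  | none => groups ++ [[sub]]

-- pass 2: collapse one group into (first start, last end, " ".join(texts))
def pvCollapse (g : List (Int × Int × String)) : Int × Int × String :=
  ((g.headD (0, 0, "")).1, (g.getLastD (0, 0, "")).2.1, PySem.Str.join " " (g.map (fun s => s.2.2)))

def merge_subtitles_py_alt (subtitles : List (Int × Int × String)) (max_gap_ms : Int) : List (Int × Int × String) :=
  if subtitles = [] ∨ max_gap_ms ≤ 0 then subtitles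
  else (subtitles.foldl (pvBStep max_gap_ms) []).map pvCollapse

-- ===== PRECONDITION & SPEC =====
def Spec_merge_subtitles_py (subtitles : List (Int × Int × String)) (max_gap_ms : Int) (out : List (Int × Int × String)) : Prop := out = merge_subtitles_py_alt subtitles max_gap_ms
instance (subtitles : List (Int × Int × String)) (max_gap_ms : Int) (out : List (Int × Int × String)) : Decidable (Spec_merge_subtitles_py subtitles max_gap_ms out) := by unfold Spec_merge_subtitles_py; infer_instance

-- ===== CLAIM (what is proved, stated in full; the proofs are below) =====
def Claim_equal_merge_subtitles_py : Prop := ∀ (subtitles : List (Int × Int × String)) (max_gap_ms : Int), Dom_merge_subtitles_py subtitles max_gap_ms → Spec_merge_subtitles_py subtitles max_gap_ms (merge_subtitles_py subtitles max_gap_ms)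

-- ===== LEMMAS AND PROOFS =====

-- " ".join over a run grows on the right exactly like A's `+= " " + text`
theorem pv_chars_join_append (sep : List Char) (ps : List (List Char)) (p : List Char) (h : ps ≠ []) :
    PySem.Chars.join sep (ps ++ [p]) = PySem.Chars.join sep ps ++ sep ++ p := by
  induction ps with
  | nil => exact absurd rfl h
  | cons q rest ih =>
      cases rest with
      | nil => simp [PySem.Chars.join_cons_cons, PySem.Chars.join_singleton]
      | cons r rest' =>
          have := ih (by simp)
          simp only [List.cons_append, PySem.Chars.join_cons_cons] at this ⊢
          simp [this]

theorem pv_join_append (ts : List String) (t : String) (h : ts ≠ []) :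
    PySem.Str.join " " (ts ++ [t]) = PySem.Str.join " " ts ++ " " ++ t := by
  apply String.ext
  rw [PySem.Str.toList_join]
  simp only [String.toList_append, PySem.Str.toList_join, List.map_append, List.map_cons, List.map_nil]
  exact pv_chars_join_append _ _ _ (by simpa using h)

theorem pv_join_one (t : String) : PySem.Str.join " " [t] = t := by
  apply String.ext
  rw [PySem.Str.toList_join]
  simp [PySem.Chars.join_singleton]

theorem pv_collapse_singleton (s : Int × Int × String) : pvCollapse [s] = s := by
  obtain ⟨a, b, t⟩ := s
  simp [pvCollapse, pv_join_one]

theorem pv_collapse_append (g : List (Int × Int × String)) (s : Int × Int × String) (h : g ≠ []) :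
    pvCollapse (g ++ [s]) = ((pvCollapse g).1, s.2.1, (pvCollapse g).2.2 ++ " " ++ s.2.2) := by
  cases g with
  | nil => exact absurd rfl h
  | cons x xs =>
      have hj := pv_join_append ((x :: xs).map (fun s => s.2.2)) s.2.2 (by simp)
      simp only [pvCollapse, List.getLastD_eq_getLast?]
      rw [List.getLast?_concat]
      simp at hj ⊢
      exact hj

theorem pv_collapse_end (g : List (Int × Int × String)) (h : g ≠ []) :
    (pvCollapse g).2.1 = (g.getLast h).2.1 := by
  simp [pvCollapse, List.getLastD_eq_getLast?, List.getLast?_eq_getLast_of_ne_nil h]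

-- one step of A, read off B's groups
theorem pv_step_eq (max_gap_ms : Int) (groups : List (List (Int × Int × String)))
    (hne : ∀ g ∈ groups, g ≠ []) (sub : Int × Int × String) :
    pvAStep max_gap_ms (groups.dropLast.map pvCollapse, groups.getLast?.map pvCollapse) sub
      = ((pvBStep max_gap_ms groups sub).dropLast.map pvCollapse,
         (pvBStep max_gap_ms groups sub).getLast?.map pvCollapse) := by
  rcases List.eq_nil_or_concat groups with rfl | ⟨gs, g, rfl⟩
  · simp [pvAStep, pvBStep, pv_collapse_singleton]
  · simp only [List.concat_eq_append] at hne ⊢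
    have hg : g ≠ [] := hne g (by simp)
    have hlast : g.getLast? = some (g.getLast hg) := List.getLast?_eq_getLast_of_ne_nil hg
    simp only [pvBStep, pvAStep, List.getLast?_concat, hlast, Option.map_some]
    rw [pv_collapse_end g hg]
    split_ifs with hgap
    · simp [pv_collapse_append g sub hg]
    · simp [pv_collapse_singleton]

theorem pv_bstep_ne (max_gap_ms : Int) (groups : List (List (Int × Int × String)))
    (hne : ∀ g ∈ groups, g ≠ []) (sub : Int × Int × String) :
    ∀ g ∈ pvBStep max_gap_ms groups sub, g ≠ [] := by
  intro g' hg'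
  unfold pvBStep at hg'
  rcases h1 : groups.getLast? with _ | g
  · simp [h1] at hg'
    rcases hg' with hg' | rfl
    · exact hne g' hg'
    · simp
  · rcases h2 : g.getLast? with _ | last
    · simp [h1, h2] at hg'
      rcases hg' with hg' | rfl
      · exact hne g' hg'
      · simp
    · simp only [h1, h2] at hg'
      split_ifs at hg' with hgap
      · rcases (List.mem_append.mp hg') with hmem | hmem
        · exact hne g' (List.mem_of_mem_dropLast hmem)
        · simp at hmem; subst hmem; simp
      · simp at hg'
        rcases hg' with hg' | rfl
        · exact hne g' hg'
        · simp

-- the loop invariant: A's state is B's groups, collapsed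
theorem pv_fold_eq (max_gap_ms : Int) (l : List (Int × Int × String)) :
    ∀ (groups : List (List (Int × Int × String))), (∀ g ∈ groups, g ≠ []) →
    l.foldl (pvAStep max_gap_ms) (groups.dropLast.map pvCollapse, groups.getLast?.map pvCollapse)
      = ((l.foldl (pvBStep max_gap_ms) groups).dropLast.map pvCollapse,
         (l.foldl (pvBStep max_gap_ms) groups).getLast?.map pvCollapse) := by
  induction l with
  | nil => intro groups _; rfl
  | cons sub l ih =>
      intro groups hne
      simp only [List.foldl_cons]
      rw [pv_step_eq max_gap_ms groups hne sub]
      exact ih _ (pv_bstep_ne max_gap_ms groups hne sub)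

-- ===== VERDICT (by name: the statement is the Claim_ definition above) =====
theorem merge_subtitles_py_spec : Claim_equal_merge_subtitles_py := by
  intro subtitles max_gap_ms _
  unfold Spec_merge_subtitles_py merge_subtitles_py merge_subtitles_py_alt
  split_ifs with hguard
  · rfl
  · have h := pv_fold_eq max_gap_ms subtitles [] (by simp)
    simp only [List.dropLast_nil, List.map_nil, List.getLast?_nil, Option.map_none] at h
    rw [h]
    rcases List.eq_nil_or_concat (subtitles.foldl (pvBStep max_gap_ms) []) with heq | ⟨gs, g, heq⟩
    · simp [heq]
    · simp [heq]
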